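-- pv_equiv track=rewrite | github.com/matthewcove-stack/context_api | scripts/sync_runtime_env.py | render_env
-- ===== SOURCE A (Python) =====
-- def render_env(values: dict[str, str]) -> str:
--     ordered_keys = [
--         "DATABASE_URL",
--         "CONTEXT_API_TOKEN",
--         "CONTEXT_API_RESEARCH_TOPIC_KEY",
--         "CONTEXT_POSTGRES_DATA_DIR",
--         "CONTEXT_API_EXPECT_PERSISTENT_CORPUS",
--         "CONTEXT_API_EXPECTED_MIN_DOCUMENTS",
--         "OPENAI_API_KEY",
--         "RESEARCH_EMBEDDING_MODEL",
--         "RESEARCH_ALLOW_HASH_EMBEDDINGS",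
--         "RESEARCH_WORKER_ENABLED",
--         "RESEARCH_RUN_MAX_NEW_ITEMS",
--     ]
--     keys = ordered_keys + sorted(key for key in values.keys() if key not in ordered_keys)
--     return "\n".join(f"{key}={values[key]}" for key in keys if key in values and values[key] != "") + "\n"
-- ===== SOURCE B (Python) =====
-- def render_env(values: dict[str, str]) -> str:
--     ordered_keys = [
--         "DATABASE_URL",
--         "CONTEXT_API_TOKEN",
--         "CONTEXT_API_RESEARCH_TOPIC_KEY",
--         "CONTEXT_POSTGRES_DATA_DIR",
--         "CONTEXT_API_EXPECT_PERSISTENT_CORPUS",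
--         "CONTEXT_API_EXPECTED_MIN_DOCUMENTS",
--         "OPENAI_API_KEY",
--         "RESEARCH_EMBEDDING_MODEL",
--         "RESEARCH_ALLOW_HASH_EMBEDDINGS",
--         "RESEARCH_WORKER_ENABLED",
--         "RESEARCH_RUN_MAX_NEW_ITEMS",
--     ]
--     rank = {key: index for index, key in enumerate(ordered_keys)}
--     keys = sorted(
--         (key for key, value in values.items() if value != ""),
--         key=lambda key: (rank.get(key, len(ordered_keys)), key),
--     )
--     return "\n".join(f"{key}={values[key]}" for key in keys) + "\n"
-- ===== Notes on version B (the rewrite author's own statement) =====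
-- stated objective: idiomatic
-- what changed: Replaces A's concatenate-priority-list-plus-sorted-leftovers-then-filter pipeline by building a rank dict once, filtering to the present non-empty keys, and doing a single sort under the tuple key (rank.get(key, 11), key).
import Mathlib
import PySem

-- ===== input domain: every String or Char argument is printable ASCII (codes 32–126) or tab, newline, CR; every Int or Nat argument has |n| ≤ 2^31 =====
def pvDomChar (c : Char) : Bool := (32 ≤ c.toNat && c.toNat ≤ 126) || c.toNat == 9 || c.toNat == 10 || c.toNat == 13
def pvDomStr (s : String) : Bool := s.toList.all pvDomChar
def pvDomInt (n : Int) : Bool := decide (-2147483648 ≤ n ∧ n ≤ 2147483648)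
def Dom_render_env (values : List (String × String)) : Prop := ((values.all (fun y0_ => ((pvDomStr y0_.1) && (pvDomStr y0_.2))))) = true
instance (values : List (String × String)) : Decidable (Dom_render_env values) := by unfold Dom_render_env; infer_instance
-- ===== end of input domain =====

-- B replaces A's "priority list ++ sorted leftovers, then filter" pipeline by one sort of the
-- present non-empty keys under the tuple key (rank, key); objective: idiomatic, same cost.

-- the priority-key literal shared by both sources
def pvOrderedKeys : List String :=
  [ "DATABASE_URL",
    "CONTEXT_API_TOKEN",
    "CONTEXT_API_RESEARCH_TOPIC_KEY",
    "CONTEXT_POSTGRES_DATA_DIR",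
    "CONTEXT_API_EXPECT_PERSISTENT_CORPUS",
    "CONTEXT_API_EXPECTED_MIN_DOCUMENTS",
    "OPENAI_API_KEY",
    "RESEARCH_EMBEDDING_MODEL",
    "RESEARCH_ALLOW_HASH_EMBEDDINGS",
    "RESEARCH_WORKER_ENABLED",
    "RESEARCH_RUN_MAX_NEW_ITEMS" ]

-- ===== PORT A =====
def render_env (values : List (String × String)) : String :=
  let d := PySem.Dict.ofList values
  let ordered_keys := pvOrderedKeys
  let keys := ordered_keys ++
    PySem.List.sorted (d.keys.filter (fun key => !ordered_keys.contains key)) (fun key => key) false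
  PySem.Str.join "\n"
    (((keys.filter (fun key => d.contains key && !(d.getD key "" == ""))).map
      (fun key => key ++ "=" ++ d.getD key ""))) ++ "\n"

-- ===== PORT B =====
def render_env_alt (values : List (String × String)) : String :=
  let d := PySem.Dict.ofList values
  let ordered_keys := pvOrderedKeys
  let rank := (PySem.List.enumerate ordered_keys).foldl
      (fun r p => r.insert p.2 p.1) PySem.Dict.empty
  let keys := PySem.List.sorted2
      ((d.items.filter (fun p => !(p.2 == ""))).map (fun p => p.1))
      (fun key => rank.getD key (PySem.List.len ordered_keys)) (fun key => key) false
  PySem.Str.join "\n" (keys.map (fun key => key ++ "=" ++ d.getD key "")) ++ "\n"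

-- ===== PRECONDITION & SPEC =====
def Spec_render_env (values : List (String × String)) (out : String) : Prop := out = render_env_alt values
instance (values : List (String × String)) (out : String) : Decidable (Spec_render_env values out) := by unfold Spec_render_env; infer_instance

-- ===== CLAIM (what is proved, stated in full; the proofs are below) =====
def Claim_equal_render_env : Prop := ∀ (values : List (String × String)), Dom_render_env values → Spec_render_env values (render_env values)

-- ===== LEMMAS AND PROOFS =====

-- B's rank function, abbreviated for the proofs
def pvRank : PySem.Dict String Int :=
  (PySem.List.enumerate pvOrderedKeys).foldl (fun r p => r.insert p.2 p.1) PySem.Dict.empty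

def pvKey1 (k : String) : Int := pvRank.getD k (PySem.List.len pvOrderedKeys)

theorem pvRank_keys : pvRank.keys = pvOrderedKeys := by decide

theorem pvKey1_of_not_mem {k : String} (h : k ∉ pvOrderedKeys) : pvKey1 k = 11 := by
  have hc : pvRank.contains k = false := by
    rw [PySem.Dict.contains_eq_decide_mem_keys, pvRank_keys]
    simpa using h
  unfold pvKey1
  rw [PySem.Dict.getD_of_not_contains _ _ hc]
  decide

theorem pvKey1_ordered_pairwise : pvOrderedKeys.Pairwise (fun a b => pvKey1 a < pvKey1 b) := by
  decide

theorem pvKey1_ordered_lt {a : String} (h : a ∈ pvOrderedKeys) : pvKey1 a < 11 := by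
  fin_cases h <;> decide

-- sorted2 with an Int first key and a String second key is sorted under the lexicographic key
theorem pv_sorted2_eq_sorted_lex {α : Type} (xs : List α) (k1 : α → Int) (k2 : α → String) :
    PySem.List.sorted2 xs k1 k2 false =
      PySem.List.sorted xs (fun x => toLex (k1 x, k2 x)) false := by
  unfold PySem.List.sorted2 PySem.List.sorted
  simp only [Bool.false_eq_true, if_false]
  congr 1
  funext acc x
  congr 1
  funext a b
  rcases lt_trichotomy (k1 a) (k1 b) with h | h | h
  · simp [h, Prod.Lex.lt_iff]
  · simp [h, Prod.Lex.lt_iff]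
  · simp [h.ne', not_lt_of_gt h, Prod.Lex.lt_iff]
    exact fun hle => absurd hle (not_le_of_gt h)

-- ===== VERDICT (by name: the statement is the Claim_ definition above) =====
theorem render_env_spec : Claim_equal_render_env := by
  intro values _
  unfold Spec_render_env
  simp only [render_env, render_env_alt]
  set d := PySem.Dict.ofList values with hd
  have hnd : d.keys.Nodup := PySem.Dict.nodup_keys_ofList values
  set Q : String → Bool := fun k => !(d.getD k "" == "") with hQ
  set P : String → Bool := fun k => d.contains k && Q k with hP
  set S : List String :=
    PySem.List.sorted (d.keys.filter (fun key => !pvOrderedKeys.contains key)) (fun key => key) false with hS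
  have hcont : ∀ a : String, d.contains a = decide (a ∈ d.keys) := fun a =>
    PySem.Dict.contains_eq_decide_mem_keys d a
  -- B's key list in terms of d.keys
  have hT : (d.items.filter (fun p => !(p.2 == ""))).map (fun p => p.1) = d.keys.filter Q := by
    rw [PySem.Dict.items_eq_map_keys d hnd ""]
    rw [List.filter_map, List.map_map]
    simp [hQ, Function.comp_def]
  have hrank :
      ((PySem.List.enumerate pvOrderedKeys).foldl (fun r p => r.insert p.2 p.1) PySem.Dict.empty)
        = pvRank := rfl
  have hmemS : ∀ a : String, a ∈ S ↔ a ∈ d.keys ∧ a ∉ pvOrderedKeys := by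
    intro a
    rw [hS, PySem.List.mem_sorted, List.mem_filter]
    simp
  have hSnodup : S.Nodup := by
    rw [(PySem.List.sorted_perm _ _ _).nodup_iff]
    exact hnd.filter _
  have hOrdNodup : pvOrderedKeys.Nodup := by decide
  -- strict order on S
  have hSlt : S.Pairwise (fun a b : String => a < b) := by
    have hle : S.Pairwise (fun a b : String => a ≤ b) :=
      PySem.List.sorted_pairwise _ (fun k => k)
    exact (hle.and hSnodup).imp (fun h => lt_of_le_of_ne h.1 h.2)
  -- the central list identity
  have hkeys :
      PySem.List.sorted2
        ((d.items.filter (fun p => !(p.2 == ""))).map (fun p => p.1))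
        (fun key => pvRank.getD key (PySem.List.len pvOrderedKeys)) (fun key => key) false
      = (pvOrderedKeys ++ S).filter P := by
    rw [hT, pv_sorted2_eq_sorted_lex, List.filter_append]
    apply PySem.List.sorted_eq_of_perm_of_pairwise_lt
    · -- permutation
      rw [List.perm_ext_iff_of_nodup ?_ (hnd.filter _)]
      · intro a
        simp only [List.mem_append, List.mem_filter, hP, Bool.and_eq_true, hcont,
          decide_eq_true_eq]
        constructor
        · rintro (⟨ha, hk, hq⟩ | ⟨ha, hk, hq⟩) <;> exact ⟨hk, hq⟩
        · rintro ⟨hk, hq⟩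
          by_cases ho : a ∈ pvOrderedKeys
          · exact Or.inl ⟨ho, ⟨hk, hq⟩⟩
          · exact Or.inr ⟨(hmemS a).mpr ⟨hk, ho⟩, ⟨hk, hq⟩⟩
      · apply List.Nodup.append (hOrdNodup.filter _) (hSnodup.filter _)
        intro a ha hb
        have h1 : a ∈ pvOrderedKeys := (List.mem_filter.mp ha).1
        have h2 : a ∉ pvOrderedKeys := ((hmemS a).mp (List.mem_filter.mp hb).1).2
        exact h2 h1
    · -- pairwise strictly increasing lexicographic key
      rw [List.pairwise_append]
      refine ⟨?_, ?_, ?_⟩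
      · refine ((pvKey1_ordered_pairwise).sublist List.filter_sublist).imp ?_
        intro a b h
        exact Prod.Lex.lt_iff.mpr (Or.inl h)
      · refine ((hSlt.sublist List.filter_sublist)).imp_of_mem ?_
        intro a b ha hb h
        have ha' : a ∉ pvOrderedKeys :=
          ((hmemS a).mp (List.mem_of_mem_filter ha)).2
        have hb' : b ∉ pvOrderedKeys :=
          ((hmemS b).mp (List.mem_of_mem_filter hb)).2
        have hk : pvKey1 a = pvKey1 b := by
          rw [pvKey1_of_not_mem ha', pvKey1_of_not_mem hb']
        exact Prod.Lex.lt_iff.mpr (Or.inr ⟨hk, h⟩)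
      · intro a ha b hb
        have ha' : a ∈ pvOrderedKeys := (List.mem_filter.mp ha).1
        have hb' : b ∉ pvOrderedKeys :=
          ((hmemS b).mp (List.mem_filter.mp hb).1).2
        have hk : pvKey1 a < pvKey1 b := by
          rw [pvKey1_of_not_mem hb']
          exact pvKey1_ordered_lt ha'
        exact Prod.Lex.lt_iff.mpr (Or.inl hk)
  rw [hrank, hkeys]
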